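-- pv_equiv track=rewrite | github.com/nresare/aoc | aoc2015/day11.py | find_two_repeats
-- ===== SOURCE A (Python) =====
-- def find_two_repeats(s: str) -> bool:
--     first_repeated = False
--     inside_repeat = False
--     for i in range(len(s)):
--         if i + 2 > len(s):
--             return False
--         if inside_repeat:
--             inside_repeat = False
--         if s[i] == s[i + 1]:
--             if first_repeated and s[i] != first_repeated:
--                 return True
--             first_repeated = s[i]
--     return False
-- ===== SOURCE B (Python) =====
-- def find_two_repeats(s: str) -> bool:
--     # Stage 1: run-length encode the string into maximal runs of equal chars.
--     runs = []
--     for c in s: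
--         if runs and runs[-1][0] == c:
--             runs[-1] = (c, runs[-1][1] + 1)
--         else:
--             runs.append((c, 1))
--     # Stage 2: a char has an adjacent double iff it heads a run of length >= 2.
--     doubled = {c for c, n in runs if n >= 2}
--     return len(doubled) >= 2
-- ===== Notes on version B (the rewrite author's own statement) =====
-- stated objective: alternative
-- what changed: Replaces A's single early-exit pair scan with a last-doubled-char register by two staged passes: a fold that run-length encodes the string into maximal runs (updating the last run in place), then a set of characters heading runs of length >= 2, returning whether at least two distinct such characters exist.
import Mathlib
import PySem

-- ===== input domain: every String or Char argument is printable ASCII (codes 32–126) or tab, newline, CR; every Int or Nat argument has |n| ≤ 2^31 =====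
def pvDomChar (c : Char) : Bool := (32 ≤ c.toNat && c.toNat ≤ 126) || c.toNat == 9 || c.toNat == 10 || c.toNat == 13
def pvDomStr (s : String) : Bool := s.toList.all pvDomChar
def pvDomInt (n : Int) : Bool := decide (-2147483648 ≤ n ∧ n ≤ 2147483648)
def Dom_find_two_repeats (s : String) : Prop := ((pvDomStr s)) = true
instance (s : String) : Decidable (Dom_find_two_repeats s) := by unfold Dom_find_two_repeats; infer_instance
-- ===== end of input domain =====

-- B replaces A's single early-exit pair scan (last-doubled-char register, dead inside_repeat
-- flag) by two staged passes: a fold that run-length encodes the string into maximal runs,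
-- then the set of characters heading runs of length ≥ 2, tested for having at least two
-- elements (objective: alternative).

-- ===== PORT A =====
-- Loop over i with early returns; first_repeated is False (none) or the last doubled char
-- (some c); inside_repeat is carried faithfully though A never sets it to True.
-- Indexing uses getD: the guard 'i + 2 > len → return False' keeps i and i+1 in range.
def pvGoA (cs : List Char) (i : Nat) (first : Option Char) (inside : Bool) : Bool :=
  if i < cs.length then
    if i + 2 > cs.length then false
    else
      let inside' := if inside then false else inside
      if cs.getD i ' ' = cs.getD (i + 1) ' ' then
        if (match first with | some c => decide (cs.getD i ' ' ≠ c) | none => false) then true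
        else pvGoA cs (i + 1) (some (cs.getD i ' ')) inside'
      else pvGoA cs (i + 1) first inside'
  else false
termination_by cs.length - i

def find_two_repeats (s : String) : Bool := pvGoA s.toList 0 none false

-- ===== PORT B =====
-- loop body of Source B: extend the last run if it has the same char, else start a new run
def pvStepB (runs : List (Char × Nat)) (c : Char) : List (Char × Nat) :=
  match runs.getLast? with
  | some (d, n) => if d = c then runs.dropLast ++ [(c, n + 1)] else runs ++ [(c, 1)]
  | none => runs ++ [(c, 1)]

-- runs, then {c for (c, n) in runs if n >= 2}, then len(...) >= 2
def find_two_repeats_alt (s : String) : Bool :=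
  let runs := s.toList.foldl pvStepB []
  let doubled : PySem.Set Char := PySem.Set.ofList
    (runs.filterMap (fun p => if 2 ≤ p.2 then some p.1 else none))
  decide (2 ≤ doubled.length)

-- ===== PRECONDITION & SPEC =====
def Spec_find_two_repeats (s : String) (out : Bool) : Prop := out = find_two_repeats_alt s
instance (s : String) (out : Bool) : Decidable (Spec_find_two_repeats s out) := by unfold Spec_find_two_repeats; infer_instance

-- ===== CLAIM (what is proved, stated in full; the proofs are below) =====
def Claim_equal_find_two_repeats : Prop := ∀ (s : String), Dom_find_two_repeats s → Spec_find_two_repeats s (find_two_repeats s)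

-- ===== LEMMAS AND PROOFS =====

-- the characters of the adjacent doubles from position i on, in order
def pvDChars (cs : List Char) (i : Nat) : List Char :=
  if i + 1 < cs.length then
    (if cs.getD i ' ' = cs.getD (i + 1) ' ' then [cs.getD i ' '] else []) ++ pvDChars cs (i + 1)
  else []
termination_by cs.length - i

-- some adjacent pair of the list differs
def pvChainNe : List Char → Bool
  | [] => false
  | [_] => false
  | a :: b :: t => (a != b) || pvChainNe (b :: t)

lemma pvGoA_eq (cs : List Char) :
    ∀ n i first inside, cs.length - i ≤ n →
      pvGoA cs i first inside = pvChainNe (first.toList ++ pvDChars cs i) := by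
  intro n
  induction n with
  | zero =>
    intro i first inside h
    have hi : ¬ i < cs.length := by omega
    rw [pvGoA.eq_def, pvDChars.eq_def]
    simp [hi, show ¬ i + 1 < cs.length by omega]
    cases first <;> simp [pvChainNe]
  | succ n ih =>
    intro i first inside h
    rw [pvGoA.eq_def, pvDChars.eq_def]
    by_cases hi : i < cs.length
    case neg =>
      simp [hi, show ¬ i + 1 < cs.length by omega]
      cases first <;> simp [pvChainNe]
    · by_cases hg : i + 2 > cs.length
      · simp [hi, hg, show ¬ i + 1 < cs.length by omega]
        cases first <;> simp [pvChainNe]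
      · have h1 : i + 1 < cs.length := by omega
        simp only [hi, if_true, hg, if_false, h1]
        by_cases hd : cs.getD i ' ' = cs.getD (i + 1) ' '
        · simp only [if_pos hd]
          cases first with
          | none =>
            rw [if_neg (by simp), ih (i + 1) (some (cs.getD i ' ')) _ (by omega)]
            simp
          | some c =>
            by_cases hne : cs.getD i ' ' = c
            · rw [if_neg (by simp only [ne_eq, decide_eq_true_eq, not_not]; exact hne),
                  ih (i + 1) (some (cs.getD i ' ')) _ (by omega)]
              subst hne
              simp [pvChainNe]
            · rw [if_pos (by simp only [ne_eq, decide_eq_true_eq]; exact hne)]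
              simp only [Option.toList, List.cons_append, List.nil_append, pvChainNe]
              exact Eq.symm (by rw [Bool.or_eq_true]
                                exact Or.inl (bne_iff_ne.mpr fun h' => hne (Eq.symm h')))
        · simp only [if_neg hd]
          rw [ih (i + 1) first _ (by omega)]
          simp

lemma pvChainNe_cons_iff (a : Char) (t : List Char) :
    pvChainNe (a :: t) = true ↔ ∃ b ∈ t, b ≠ a := by
  induction t generalizing a with
  | nil => simp [pvChainNe]
  | cons b t ih =>
    simp only [pvChainNe, Bool.or_eq_true, bne_iff_ne, ih]
    constructor
    · rintro (hab | ⟨c, hc, hcb⟩)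
      · exact ⟨b, by simp, Ne.symm hab⟩
      · by_cases hba : b = a
        · exact ⟨c, by simp [hc], hba ▸ hcb⟩
        · exact ⟨b, by simp, hba⟩
    · rintro ⟨x, hx, hxa⟩
      by_cases hab : a = b
      · right
        rcases List.mem_cons.mp hx with rfl | hxt
        · exact absurd hab.symm hxa
        · exact ⟨x, hxt, hab ▸ hxa⟩
      · exact Or.inl hab

lemma two_le_length_nodup_iff (S : List Char) (h : S.Nodup) :
    2 ≤ S.length ↔ ∃ x ∈ S, ∃ y ∈ S, x ≠ y := by
  match S with
  | [] => simp
  | [a] => simp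
  | a :: b :: t =>
    constructor
    · intro _
      exact ⟨a, by simp, b, by simp, by
        intro hab; exact (List.nodup_cons.mp h).1 (hab ▸ List.mem_cons_self ..)⟩
    · intro _; simp only [List.length_cons]; omega

lemma pvChainNe_eq_card (l : List Char) :
    pvChainNe l = decide (2 ≤ (PySem.Set.ofList l).length) := by
  cases l with
  | nil => simp [pvChainNe, PySem.Set.ofList]
  | cons a t =>
    have h1 := pvChainNe_cons_iff a t
    have h2 : 2 ≤ (PySem.Set.ofList (a :: t)).length ↔ ∃ b ∈ t, b ≠ a := by
      rw [two_le_length_nodup_iff _ (PySem.Set.nodup_ofList (a :: t))]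
      constructor
      · rintro ⟨x, hx, y, hy, hxy⟩
        rw [PySem.Set.mem_ofList] at hx hy
        by_cases hxa : x = a
        · subst hxa
          rcases List.mem_cons.mp hy with rfl | hyt
          · exact absurd rfl hxy
          · exact ⟨y, hyt, Ne.symm hxy⟩
        · rcases List.mem_cons.mp hx with rfl | hxt
          · exact absurd rfl hxa
          · exact ⟨x, hxt, hxa⟩
      · rintro ⟨b, hb, hba⟩
        exact ⟨a, by rw [PySem.Set.mem_ofList]; simp, b,
          by rw [PySem.Set.mem_ofList]; simp [hb], Ne.symm hba⟩
    cases hb : pvChainNe (a :: t)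
    · have hno : ¬ ∃ b ∈ t, b ≠ a := by rw [← h1, hb]; simp
      have hlt : ¬ 2 ≤ (PySem.Set.ofList (a :: t)).length := fun hx => hno (h2.mp hx)
      simp [hlt]
    · rw [h1] at hb
      simp [h2.mpr hb]

-- ---- the fold builds the run-length encoding; relate its doubles to the adjacent doubles ----

-- structural version of the adjacent-double characters
def pvDbl2 : List Char → List Char
  | a :: b :: t => (if a = b then [a] else []) ++ pvDbl2 (b :: t)
  | _ => []

lemma pvDChars_eq_pvDbl2 (cs : List Char) :
    ∀ m i, cs.length - i ≤ m → pvDChars cs i = pvDbl2 (cs.drop i) := by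
  intro m
  induction m with
  | zero =>
    intro i h
    rw [pvDChars, if_neg (by omega)]
    have : cs.drop i = [] := List.drop_eq_nil_of_le (by omega)
    rw [this]
    rfl
  | succ m ih =>
    intro i h
    by_cases h1 : i + 1 < cs.length
    · have hi : i < cs.length := by omega
      rw [pvDChars, if_pos h1, ih (i + 1) (by omega)]
      rw [List.drop_eq_getElem_cons hi, List.drop_eq_getElem_cons h1]
      rw [pvDbl2]
      rw [List.getD_eq_getElem cs ' ' hi, List.getD_eq_getElem cs ' ' h1]
    · rw [pvDChars, if_neg h1]
      rcases hd : cs.drop i with _ | ⟨a, t⟩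
      · rfl
      · have : t = [] := by
          have := List.length_drop (l := cs) (i := i)
          rw [hd] at this
          simp at this
          exact List.eq_nil_of_length_eq_zero (by omega)
        rw [this, pvDbl2.eq_def]

-- the doubles-extraction over a run list
def pvDblOf (runs : List (Char × Nat)) : List Char :=
  runs.filterMap (fun p => if 2 ≤ p.2 then some p.1 else none)

-- appending one char to the string: its structural doubles gain the char iff it repeats the last
lemma pvDbl2_concat (cs : List Char) (c : Char) :
    pvDbl2 (cs ++ [c]) = pvDbl2 cs ++ (if cs.getLast? = some c then [c] else []) := by
  induction cs with
  | nil => simp [pvDbl2]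
  | cons a t ih =>
    rcases t with _ | ⟨b, t'⟩
    · by_cases hac : a = c
      · subst hac; simp [pvDbl2]
      · simp [pvDbl2, hac]
    · simp only [List.cons_append] at ih ⊢
      rw [pvDbl2, pvDbl2, ih]
      rw [List.getLast?_cons_cons]
      simp [List.append_assoc]

lemma pvStepB_none (runs : List (Char × Nat)) (c : Char) (h : runs.getLast? = none) :
    pvStepB runs c = runs ++ [(c, 1)] := by
  rw [pvStepB, h]

lemma pvStepB_some (runs : List (Char × Nat)) (c d : Char) (n : Nat)
    (h : runs.getLast? = some (d, n)) :
    pvStepB runs c = if d = c then runs.dropLast ++ [(c, n + 1)] else runs ++ [(c, 1)] := by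
  rw [pvStepB, h]

-- invariant of the fold: the accumulated runs end with the last seen char, and their
-- doubled characters are exactly (as members) the structural adjacent doubles so far
lemma pvFold_inv (cs : List Char) :
    ((cs.foldl pvStepB []).getLast?.map Prod.fst = cs.getLast?) ∧
    (∀ p ∈ cs.foldl pvStepB [], 1 ≤ p.2) ∧
    (∀ x, x ∈ pvDblOf (cs.foldl pvStepB []) ↔ x ∈ pvDbl2 cs) := by
  induction cs using List.reverseRecOn with
  | nil => exact ⟨rfl, by intro p hp; simp at hp, by intro x; rfl⟩
  | append_singleton cs c ih =>
    obtain ⟨ihlast, ihcnt, ihmem⟩ := ih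
    rw [List.foldl_append]
    simp only [List.foldl_cons, List.foldl_nil]
    rcases hR : (cs.foldl pvStepB []).getLast? with _ | ⟨d, n⟩
    · -- runs empty: cs fold is [], and cs has no last char
      have hcs : cs.getLast? = none := by rw [← ihlast, hR]; rfl
      have hRnil : cs.foldl pvStepB [] = [] := List.getLast?_eq_none_iff.mp hR
      rw [pvStepB_none _ _ hR]
      refine ⟨by simp [hRnil], ?_, ?_⟩
      · intro p hp
        rcases List.mem_append.mp hp with h | h
        · exact ihcnt p h
        · rcases List.mem_singleton.mp h with rfl; exact le_refl 1
      · intro x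
        rw [pvDbl2_concat, hcs]
        simp only [if_neg (by simp : ¬ (none : Option Char) = some c), List.append_nil]
        rw [show pvDblOf (cs.foldl pvStepB [] ++ [(c, 1)]) = pvDblOf (cs.foldl pvStepB []) by
              rw [pvDblOf, pvDblOf, List.filterMap_append]; simp]
        exact ihmem x
    · have hcs : cs.getLast? = some d := by rw [← ihlast, hR]; rfl
      have hRne : cs.foldl pvStepB [] ≠ [] := by
        intro hnil; rw [hnil] at hR; simp at hR
      rw [pvStepB_some _ _ _ _ hR]
      by_cases hdc : d = c
      · rw [if_pos hdc]
        have hsplit : cs.foldl pvStepB [] = (cs.foldl pvStepB []).dropLast ++ [(d, n)] := by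
          conv_lhs => rw [← List.dropLast_append_getLast? (d, n) hR]
        have hn1 : 1 ≤ n := by
          have hmemdn : (d, n) ∈ cs.foldl pvStepB [] := by
            rw [hsplit]; exact List.mem_append.mpr (Or.inr (List.mem_singleton.mpr rfl))
          exact ihcnt (d, n) hmemdn
        refine ⟨by simp, ?_, ?_⟩
        · intro p hp
          rcases List.mem_append.mp hp with h | h
          · exact ihcnt p ((List.dropLast_sublist _).mem h)
          · rcases List.mem_singleton.mp h with rfl; omega
        · intro x
          rw [pvDbl2_concat, hcs, if_pos (by rw [hdc])]
          rw [pvDblOf, List.filterMap_append]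
          have hmem' := ihmem x
          rw [hsplit, pvDblOf, List.filterMap_append] at hmem'
          simp only [List.filterMap_cons, List.filterMap_nil] at hmem' ⊢
          rw [if_pos (by omega : 2 ≤ n + 1)]
          by_cases h2n : 2 ≤ n
          · rw [if_pos h2n] at hmem'
            subst hdc
            simp only [List.mem_append, List.mem_cons, List.not_mem_nil, or_false] at *
            tauto
          · rw [if_neg h2n] at hmem'
            subst hdc
            simp only [List.append_nil] at hmem'
            simp only [List.mem_append, List.mem_cons, List.not_mem_nil, or_false] at *
            tauto
      · rw [if_neg hdc]
        refine ⟨by simp, ?_, ?_⟩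
        · intro p hp
          rcases List.mem_append.mp hp with h | h
          · exact ihcnt p h
          · rcases List.mem_singleton.mp h with rfl; exact le_refl 1
        · intro x
          rw [pvDbl2_concat, hcs, if_neg (by simpa using fun h => hdc h), List.append_nil]
          rw [pvDblOf, List.filterMap_append]
          simp only [List.filterMap_cons, List.filterMap_nil]
          rw [if_neg (by omega : ¬ 2 ≤ 1)]
          simp only [List.append_nil]
          exact ihmem x

-- ===== VERDICT (by name: the statement is the Claim_ definition above) =====
theorem find_two_repeats_spec : Claim_equal_find_two_repeats := by
  intro s _
  unfold Spec_find_two_repeats find_two_repeats find_two_repeats_alt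
  rw [pvGoA_eq s.toList (s.toList.length) 0 none false (by omega)]
  simp only [Option.toList, List.nil_append]
  rw [pvChainNe_eq_card]
  apply decide_eq_decide.mpr
  have hmem : ∀ x, x ∈ (s.toList.foldl pvStepB []).filterMap
      (fun p => if 2 ≤ p.2 then some p.1 else none) ↔ x ∈ pvDChars s.toList 0 := by
    intro x
    rw [pvDChars_eq_pvDbl2 s.toList (s.toList.length) 0 (by omega), List.drop_zero]
    exact (pvFold_inv s.toList).2.2 x
  rw [two_le_length_nodup_iff _ (PySem.Set.nodup_ofList _),
      two_le_length_nodup_iff _ (PySem.Set.nodup_ofList _)]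
  constructor
  · rintro ⟨a, ha, b, hb, hab⟩
    rw [PySem.Set.mem_ofList] at ha hb
    exact ⟨a, (PySem.Set.mem_ofList ..).mpr ((hmem a).mpr ha),
           b, (PySem.Set.mem_ofList ..).mpr ((hmem b).mpr hb), hab⟩
  · rintro ⟨a, ha, b, hb, hab⟩
    rw [PySem.Set.mem_ofList] at ha hb
    exact ⟨a, (PySem.Set.mem_ofList ..).mpr ((hmem a).mp ha),
           b, (PySem.Set.mem_ofList ..).mpr ((hmem b).mp hb), hab⟩
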